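-- pv_equiv track=rewrite | github.com/bleonheart/Lilia | find_unused_strings.py | find_unused_keys
-- ===== SOURCE A (Python) =====
-- from typing import Set, Dict, List
--
-- def find_unused_keys(all_strings: Set[str], language_keys: Dict[str, str]) -> Set[str]:
--     """Find language keys that are not used in any quoted strings."""
--     unused_keys = set()
--
--     for key in language_keys.keys():
--         # Check if the key appears in any quoted string
--         key_used = False
--         for string_content in all_strings:
--             if key in string_content:
--                 key_used = True
--                 break
--
--         if not key_used:
--             unused_keys.add(key)
--
--     return unused_keys
-- ===== SOURCE B (Python) =====
-- def find_unused_keys(all_strings, language_keys):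
--     """Find language keys that are not used in any quoted strings."""
--     remaining = list(language_keys.keys())
--     for string_content in all_strings:
--         if not remaining:
--             break
--         remaining = [k for k in remaining if k not in string_content]
--     return set(remaining)
-- ===== Notes on version B (the rewrite author's own statement) =====
-- stated objective: alternative
-- what changed: B swaps the loop nesting: instead of scanning all strings for each key, it makes one pass over the strings maintaining the shrinking list of still-unmatched keys and stops early once every key has been seen.
import Mathlib
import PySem

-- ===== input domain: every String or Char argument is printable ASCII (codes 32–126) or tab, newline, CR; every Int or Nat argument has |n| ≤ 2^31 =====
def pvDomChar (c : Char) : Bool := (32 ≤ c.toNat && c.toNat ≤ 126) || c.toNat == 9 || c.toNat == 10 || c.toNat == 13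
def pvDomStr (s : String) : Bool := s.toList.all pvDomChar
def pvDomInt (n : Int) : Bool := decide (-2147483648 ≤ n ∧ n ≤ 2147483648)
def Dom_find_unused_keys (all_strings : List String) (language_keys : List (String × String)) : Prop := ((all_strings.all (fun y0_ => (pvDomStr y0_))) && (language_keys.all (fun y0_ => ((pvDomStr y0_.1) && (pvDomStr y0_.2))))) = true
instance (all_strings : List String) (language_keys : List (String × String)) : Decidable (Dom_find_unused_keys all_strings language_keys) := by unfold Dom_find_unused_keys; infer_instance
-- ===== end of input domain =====

-- B swaps the loop nesting: one pass over the strings keeps the shrinking list of still-unmatched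
-- keys (with an early break once it is empty), instead of scanning all strings per key.


-- ===== PORT A =====
-- inner loop: 'for string_content in all_strings: if key in string_content: key_used = True; break'
def pvKeyUsedA (key : String) : List String → Bool
  | [] => false
  | s :: rest => if PySem.Str.isIn key s then true else pvKeyUsedA key rest

def find_unused_keys (all_strings : List String) (language_keys : List (String × String)) : List String :=
  ((PySem.Dict.ofList language_keys).keys).foldl
    (fun unused_keys key =>
      if pvKeyUsedA key all_strings then unused_keys else PySem.Set.add unused_keys key)
    PySem.Set.empty

-- ===== PORT B =====
-- 'for s in all_strings: if not remaining: break; remaining = [k for k in remaining if k not in s]'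
def pvRemainLoop : List String → List String → List String
  | remaining, [] => remaining
  | remaining, s :: rest =>
      if remaining = [] then remaining
      else pvRemainLoop (remaining.filter (fun k => !PySem.Str.isIn k s)) rest

def find_unused_keys_alt (all_strings : List String) (language_keys : List (String × String)) : List String :=
  pvRemainLoop ((PySem.Dict.ofList language_keys).keys) all_strings

-- ===== PRECONDITION & SPEC =====
def Spec_find_unused_keys (all_strings : List String) (language_keys : List (String × String)) (out : List String) : Prop := out = find_unused_keys_alt all_strings language_keys
instance (all_strings : List String) (language_keys : List (String × String)) (out : List String) : Decidable (Spec_find_unused_keys all_strings language_keys out) := by unfold Spec_find_unused_keys; infer_instance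

-- ===== CLAIM (what is proved, stated in full; the proofs are below) =====
def Claim_equal_find_unused_keys : Prop := ∀ (all_strings : List String) (language_keys : List (String × String)), Dom_find_unused_keys all_strings language_keys → Spec_find_unused_keys all_strings language_keys (find_unused_keys all_strings language_keys)

-- ===== LEMMAS AND PROOFS =====

-- A's inner loop is 'any string contains the key'.
theorem pvKeyUsedA_eq_any (key : String) (strs : List String) :
    pvKeyUsedA key strs = strs.any (fun s => PySem.Str.isIn key s) := by
  induction strs with
  | nil => rfl
  | cons s rest ih =>
    cases hc : PySem.Str.isIn key s <;> simp only [pvKeyUsedA, hc, if_true, if_false, Bool.false_eq_true, ih, List.any_cons] <;> simp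

-- A's outer loop over a Nodup key list, started from an accumulator disjoint from it, appends the filter.
theorem pvFoldAddFilter (p : String → Bool) :
    ∀ (K acc : List String), K.Nodup → (∀ k ∈ K, k ∉ acc) →
      K.foldl (fun acc k => if p k then acc else PySem.Set.add acc k) acc
        = acc ++ K.filter (fun k => !p k) := by
  intro K
  induction K with
  | nil => intro acc _ _; simp
  | cons k K ih =>
    intro acc hnd hdisj
    have hk : k ∉ acc := hdisj k (by simp)
    have hnd' := (List.nodup_cons.mp hnd).2
    have hknotK := (List.nodup_cons.mp hnd).1
    by_cases hp : p k = true
    · simp only [List.foldl_cons, hp, if_true, List.filter_cons]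
      rw [ih acc hnd' (fun x hx => hdisj x (by simp [hx]))]
      simp
    · have hpf : p k = false := by simp [Bool.not_eq_true] at hp; exact hp
      have hadd : PySem.Set.add acc k = acc ++ [k] := by
        simpa [PySem.Set.add, PySem.Set.contains] using hk
      simp only [List.foldl_cons, hpf, Bool.false_eq_true, if_false, hadd, List.filter_cons,
        Bool.not_false, if_true]
      rw [ih (acc ++ [k]) hnd' ?_]
      · simp
      · intro x hx
        simp only [List.mem_append, List.mem_singleton]
        rintro (hxa | rfl)
        · exact hdisj x (by simp [hx]) hxa
        · exact hknotK hx
  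
-- B's loop filters the key list by 'no string contains it'.
theorem pvRemainLoop_eq_filter :
    ∀ (strs rem : List String),
      pvRemainLoop rem strs = rem.filter (fun k => !strs.any (fun s => PySem.Str.isIn k s)) := by
  intro strs
  induction strs with
  | nil => intro rem; simp [pvRemainLoop]
  | cons s rest ih =>
    intro rem
    by_cases h : rem = []
    · simp [pvRemainLoop, h]
    · simp only [pvRemainLoop, if_neg h, ih, List.filter_filter]
      apply List.filter_congr
      intro k _
      simp [List.any_cons]
      rw [Bool.and_comm]

-- ===== VERDICT (by name: the statement is the Claim_ definition above) =====
theorem find_unused_keys_spec : Claim_equal_find_unused_keys := by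
  intro all_strings language_keys _
  unfold Spec_find_unused_keys find_unused_keys find_unused_keys_alt
  rw [pvRemainLoop_eq_filter]
  have hnd := PySem.Dict.nodup_keys_ofList (κ := String) (ν := String) language_keys
  rw [pvFoldAddFilter (fun k => pvKeyUsedA k all_strings) _ PySem.Set.empty hnd (by simp [PySem.Set.empty])]
  simp [PySem.Set.empty]
  apply List.filter_congr
  intro k _
  rw [pvKeyUsedA_eq_any]
  simp [PySem.Str.isIn]
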